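-- pv_equiv track=rewrite | github.com/supportersimulator/3-surgeons | three_surgeons/input/prompt_sharpener.py | _build_question_pack
-- ===== SOURCE A (Python) =====
-- def _build_question_pack(signals: list[str]) -> list[str]:
--     """Map signals → ≤3 clarifying questions (deduped)."""
--     questions: list[str] = []
--     seen: set[str] = set()
--
--     def add(q: str) -> None:
--         if q not in seen:
--             seen.add(q)
--             questions.append(q)
--
--     for sig in signals:
--         if len(questions) >= 3:
--             break
--         if sig in ("bare_verb", "no_target"):
--             add("Which file, function, or line number is the target?")
--         elif sig == "unresolved_anaphora":
--             add("What does \"this/that\" refer to — a file, a symptom, "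
--                 "or a prior message?")
--         elif sig == "abstract_goal":
--             add("What measurable outcome would mean this is done? "
--                 "(perf number, test passing, behaviour change)")
--         elif sig == "scope_plural":
--             add("Which specific items in the set — or do you mean "
--                 "the whole set?")
--         elif sig == "polysemous":
--             add("Which sense of that word — the build step, the source dir, "
--                 "the deploy target?")
--         elif sig == "missing_constraint":
--             add("Are there constraints I should know — must/should/never, "
--                 "deadlines, version pins?")
--     return questions
-- ===== SOURCE B (Python) =====
-- _QUESTIONS = {
--     "bare_verb": "Which file, function, or line number is the target?",
--     "no_target": "Which file, function, or line number is the target?",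
--     "unresolved_anaphora": "What does \"this/that\" refer to — a file, a symptom, "
--                            "or a prior message?",
--     "abstract_goal": "What measurable outcome would mean this is done? "
--                      "(perf number, test passing, behaviour change)",
--     "scope_plural": "Which specific items in the set — or do you mean "
--                     "the whole set?",
--     "polysemous": "Which sense of that word — the build step, the source dir, "
--                   "the deploy target?",
--     "missing_constraint": "Are there constraints I should know — must/should/never, "
--                           "deadlines, version pins?",
-- }
--
--
-- def _build_question_pack(signals: list[str]) -> list[str]:
--     """Map signals → ≤3 clarifying questions (deduped)."""
--     # Selection-style: for each of the 3 slots, rescan signals from the start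
--     # for the earliest question that has not been picked yet.
--     picked: list[str] = []
--     for _ in range(3):
--         nxt = next((_QUESTIONS[s] for s in signals
--                     if s in _QUESTIONS and _QUESTIONS[s] not in picked), None)
--         if nxt is None:
--             break
--         picked.append(nxt)
--     return picked
-- ===== Notes on version B (the rewrite author's own statement) =====
-- stated objective: alternative
-- what changed: Replaces A's single pass over signals with inline seen-set dedup and break-at-3 by a selection-style loop: for each of the 3 output slots it rescans signals from the start for the earliest mapped question not yet picked, stopping when none is found.
import Mathlib
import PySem

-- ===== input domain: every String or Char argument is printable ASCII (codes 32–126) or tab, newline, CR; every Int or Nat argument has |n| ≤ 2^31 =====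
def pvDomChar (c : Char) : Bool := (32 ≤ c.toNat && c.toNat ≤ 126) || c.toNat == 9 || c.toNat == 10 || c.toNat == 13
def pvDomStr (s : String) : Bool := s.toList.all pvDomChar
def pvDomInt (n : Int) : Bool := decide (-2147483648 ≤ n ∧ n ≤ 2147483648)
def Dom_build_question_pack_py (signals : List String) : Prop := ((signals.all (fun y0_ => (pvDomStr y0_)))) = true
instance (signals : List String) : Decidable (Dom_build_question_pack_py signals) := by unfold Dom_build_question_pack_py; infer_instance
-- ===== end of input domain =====

-- B replaces A's single pass (inline seen-set dedup, break at 3) by a selection-style loop: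
-- for each of the 3 output slots it rescans signals for the earliest question not yet picked.

-- ===== PORT A =====
-- A's nested 'add' helper: append q unless already seen, threading (questions, seen).
def pvAddA (st : List String × PySem.Set String) (q : String) : List String × PySem.Set String :=
  if st.2.contains q then st else (st.1 ++ [q], st.2.add q)

-- A's 'for sig in signals' loop with its 'break' when 3 questions are collected.
def pvLoopA : List String → List String × PySem.Set String → List String × PySem.Set String
  | [], st => st
  | sig :: rest, st =>
    if 3 ≤ st.1.length then st
    else
      pvLoopA rest
        (if sig == "bare_verb" || sig == "no_target" then
          pvAddA st "Which file, function, or line number is the target?"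
        else if sig == "unresolved_anaphora" then
          pvAddA st "What does \"this/that\" refer to — a file, a symptom, or a prior message?"
        else if sig == "abstract_goal" then
          pvAddA st "What measurable outcome would mean this is done? (perf number, test passing, behaviour change)"
        else if sig == "scope_plural" then
          pvAddA st "Which specific items in the set — or do you mean the whole set?"
        else if sig == "polysemous" then
          pvAddA st "Which sense of that word — the build step, the source dir, the deploy target?"
        else if sig == "missing_constraint" then
          pvAddA st "Are there constraints I should know — must/should/never, deadlines, version pins?"
        else st)

def build_question_pack_py (signals : List String) : List String :=
  (pvLoopA signals ([], PySem.Set.empty)).1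

-- ===== PORT B =====
-- the static signal → question table (_QUESTIONS in Source B)
def pvQTable : PySem.Dict String String :=
  PySem.Dict.ofList
    [("bare_verb", "Which file, function, or line number is the target?"),
     ("no_target", "Which file, function, or line number is the target?"),
     ("unresolved_anaphora", "What does \"this/that\" refer to — a file, a symptom, or a prior message?"),
     ("abstract_goal", "What measurable outcome would mean this is done? (perf number, test passing, behaviour change)"),
     ("scope_plural", "Which specific items in the set — or do you mean the whole set?"),
     ("polysemous", "Which sense of that word — the build step, the source dir, the deploy target?"),
     ("missing_constraint", "Are there constraints I should know — must/should/never, deadlines, version pins?")]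

-- next((_QUESTIONS[s] for s in signals if s in _QUESTIONS and _QUESTIONS[s] not in picked), None)
def pvFirstNew : List String → List String → Option String
  | [], _ => none
  | s :: rest, picked =>
      match pvQTable.get? s with
      | some q => if q ∈ picked then pvFirstNew rest picked else some q
      | none => pvFirstNew rest picked

-- for _ in range(3): find next question not yet picked; break when None
def pvPickLoop : Nat → List String → List String → List String
  | 0, _, picked => picked
  | n + 1, signals, picked =>
      match pvFirstNew signals picked with
      | none => picked
      | some q => pvPickLoop n signals (picked ++ [q])

def build_question_pack_py_alt (signals : List String) : List String :=
  pvPickLoop 3 signals []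

-- ===== PRECONDITION & SPEC =====
def Spec_build_question_pack_py (signals : List String) (out : List String) : Prop := out = build_question_pack_py_alt signals
instance (signals : List String) (out : List String) : Decidable (Spec_build_question_pack_py signals out) := by unfold Spec_build_question_pack_py; infer_instance

-- ===== CLAIM (what is proved, stated in full; the proofs are below) =====
def Claim_equal_build_question_pack_py : Prop := ∀ (signals : List String), Dom_build_question_pack_py signals → Spec_build_question_pack_py signals (build_question_pack_py signals)

-- ===== LEMMAS AND PROOFS =====

-- proof helper: the question A's elif chain maps a signal to (none = fall through)
def pvQOf (s : String) : Option String :=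
  if s == "bare_verb" || s == "no_target" then
    some "Which file, function, or line number is the target?"
  else if s == "unresolved_anaphora" then
    some "What does \"this/that\" refer to — a file, a symptom, or a prior message?"
  else if s == "abstract_goal" then
    some "What measurable outcome would mean this is done? (perf number, test passing, behaviour change)"
  else if s == "scope_plural" then
    some "Which specific items in the set — or do you mean the whole set?"
  else if s == "polysemous" then
    some "Which sense of that word — the build step, the source dir, the deploy target?"
  else if s == "missing_constraint" then
    some "Are there constraints I should know — must/should/never, deadlines, version pins?"
  else none

-- proof helper: dedup of a list relative to an already-seen prefix
def pvDedupFrom (seen : List String) : List String → List String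
  | [] => []
  | q :: l => if q ∈ seen then pvDedupFrom seen l else q :: pvDedupFrom (seen ++ [q]) l

lemma pvQTable_items : pvQTable.items =
    [("bare_verb", "Which file, function, or line number is the target?"),
     ("no_target", "Which file, function, or line number is the target?"),
     ("unresolved_anaphora", "What does \"this/that\" refer to \u2014 a file, a symptom, or a prior message?"),
     ("abstract_goal", "What measurable outcome would mean this is done? (perf number, test passing, behaviour change)"),
     ("scope_plural", "Which specific items in the set \u2014 or do you mean the whole set?"),
     ("polysemous", "Which sense of that word \u2014 the build step, the source dir, the deploy target?"),
     ("missing_constraint", "Are there constraints I should know \u2014 must/should/never, deadlines, version pins?")] := by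
  decide

set_option maxRecDepth 32768 in
lemma pvQTable_get (s : String) : pvQTable.get? s = pvQOf s := by
  by_cases h1 : s = "bare_verb"
  · subst h1; decide
  by_cases h2 : s = "no_target"
  · subst h2; decide
  by_cases h3 : s = "unresolved_anaphora"
  · subst h3; decide
  by_cases h4 : s = "abstract_goal"
  · subst h4; decide
  by_cases h5 : s = "scope_plural"
  · subst h5; decide
  by_cases h6 : s = "polysemous"
  · subst h6; decide
  by_cases h7 : s = "missing_constraint"
  · subst h7; decide
  have c1 : ("bare_verb" == s) = false := beq_eq_false_iff_ne.mpr (Ne.symm h1)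
  have c2 : ("no_target" == s) = false := beq_eq_false_iff_ne.mpr (Ne.symm h2)
  have c3 : ("unresolved_anaphora" == s) = false := beq_eq_false_iff_ne.mpr (Ne.symm h3)
  have c4 : ("abstract_goal" == s) = false := beq_eq_false_iff_ne.mpr (Ne.symm h4)
  have c5 : ("scope_plural" == s) = false := beq_eq_false_iff_ne.mpr (Ne.symm h5)
  have c6 : ("polysemous" == s) = false := beq_eq_false_iff_ne.mpr (Ne.symm h6)
  have c7 : ("missing_constraint" == s) = false := beq_eq_false_iff_ne.mpr (Ne.symm h7)
  simp [PySem.Dict.get?, pvQTable_items, List.find?, pvQOf, h1, h2, h3, h4, h5, h6, h7,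
    c1, c2, c3, c4, c5, c6, c7]

lemma pvLoopA_step (sig : String) (rest : List String) (st : List String × PySem.Set String)
    (h : ¬ 3 ≤ st.1.length) :
    pvLoopA (sig :: rest) st =
      pvLoopA rest (match pvQOf sig with | none => st | some q => pvAddA st q) := by
  simp only [pvLoopA, if_neg h, pvQOf]
  split_ifs <;> rfl

lemma pvLoopA_main : ∀ (sigs qs : List String) (seen : PySem.Set String),
    (∀ q, seen.contains q = true ↔ q ∈ qs) → qs.length ≤ 3 →
    (pvLoopA sigs (qs, seen)).1 =
      (qs ++ pvDedupFrom qs (sigs.filterMap pvQOf)).take 3 := by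
  intro sigs
  induction sigs with
  | nil =>
    intro qs seen _ hlen
    simp [pvLoopA, pvDedupFrom, List.take_of_length_le hlen]
  | cons sig rest ih =>
    intro qs seen hseen hlen
    by_cases hfull : 3 ≤ qs.length
    · have hq3 : qs.length = 3 := le_antisymm hlen hfull
      simp [pvLoopA, hfull, List.take_append_of_le_length (by omega), List.take_of_length_le (by omega)]
    · rw [pvLoopA_step sig rest (qs, seen) hfull]
      cases hqo : pvQOf sig with
      | none => simp [hqo, ih qs seen hseen hlen]
      | some q =>
        simp only [List.filterMap_cons, hqo]
        by_cases hmem : q ∈ qs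
        · have hin : q ∈ seen := (PySem.Set.contains_iff seen q).mp ((hseen q).mpr hmem)
          rw [show pvAddA (qs, seen) q = (qs, seen) from by simp [pvAddA, hin]]
          rw [ih qs seen hseen hlen]
          simp [pvDedupFrom, hmem]
        · have hnin : q ∉ seen := fun h =>
            hmem ((hseen q).mp ((PySem.Set.contains_iff seen q).mpr h))
          rw [show pvAddA (qs, seen) q = (qs ++ [q], seen.add q) from by simp [pvAddA, hnin]]
          rw [ih (qs ++ [q]) (seen.add q)
            (fun x => by
              have hx : x ∈ seen ↔ x ∈ qs :=
                (PySem.Set.contains_iff seen x).symm.trans (hseen x)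
              simp only [PySem.Set.contains_iff, PySem.Set.mem_add, List.mem_append,
                List.mem_singleton]
              tauto)
            (by simp; omega)]
          simp [pvDedupFrom, hmem]

-- B-side: pvFirstNew finds the head of the dedup-remainder
lemma pvFirstNew_eq (sigs : List String) : ∀ (picked : List String),
    pvFirstNew sigs picked = (pvDedupFrom picked (sigs.filterMap pvQOf)).head? := by
  induction sigs with
  | nil => intro picked; simp [pvFirstNew, pvDedupFrom]
  | cons s rest ih =>
    intro picked
    simp only [pvFirstNew, pvQTable_get, List.filterMap_cons]
    cases hqo : pvQOf s with
    | none => exact ih picked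
    | some q =>
      simp only [pvDedupFrom]
      by_cases h : q ∈ picked
      · simp [h, ih picked]
      · simp [h]

-- dedup output never contains a seen element
lemma pvDedupFrom_not_mem_seen : ∀ (l seen : List String) (a : String),
    a ∈ seen → a ∉ pvDedupFrom seen l := by
  intro l
  induction l with
  | nil => intro seen a _; simp [pvDedupFrom]
  | cons q l ih =>
    intro seen a ha
    simp only [pvDedupFrom]
    by_cases h : q ∈ seen
    · simpa [h] using ih seen a ha
    · have haq : a ≠ q := fun e => h (e ▸ ha)
      simp only [if_neg h, List.mem_cons, not_or]
      exact ⟨haq, ih (seen ++ [q]) a (by simp [ha])⟩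

-- dedup output has no duplicates
lemma pvDedupFrom_nodup : ∀ (l seen : List String), (pvDedupFrom seen l).Nodup := by
  intro l
  induction l with
  | nil => intro seen; simp [pvDedupFrom]
  | cons q l ih =>
    intro seen
    simp only [pvDedupFrom]
    by_cases h : q ∈ seen
    · simpa [h] using ih seen
    · simp only [if_neg h, List.nodup_cons]
      exact ⟨pvDedupFrom_not_mem_seen l (seen ++ [q]) q (by simp), ih (seen ++ [q])⟩

-- dedup depends on seen only through membership
lemma pvDedupFrom_congr : ∀ (l s1 s2 : List String),
    (∀ x, x ∈ s1 ↔ x ∈ s2) → pvDedupFrom s1 l = pvDedupFrom s2 l := by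
  intro l
  induction l with
  | nil => intros; simp [pvDedupFrom]
  | cons q l ih =>
    intro s1 s2 h
    simp only [pvDedupFrom]
    by_cases hq : q ∈ s1
    · simp [hq, (h q).mp hq, ih s1 s2 h]
    · have hq2 : q ∉ s2 := fun e => hq ((h q).mpr e)
      simp only [if_neg hq, if_neg hq2]
      exact congrArg _ (ih (s1 ++ [q]) (s2 ++ [q]) (fun x => by simp [h x]))

-- extending seen by q filters q out of the dedup
lemma pvDedupFrom_snoc : ∀ (l p : List String) (q : String),
    pvDedupFrom (p ++ [q]) l = (pvDedupFrom p l).filter (fun x => x ≠ q) := by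
  intro l
  induction l with
  | nil => intros; simp [pvDedupFrom]
  | cons x l ih =>
    intro p q
    by_cases hp : x ∈ p
    · simp only [pvDedupFrom, if_pos (show x ∈ p ++ [q] by simp [hp]), if_pos hp]
      exact ih p q
    · by_cases hxq : x = q
      · subst hxq
        simp only [pvDedupFrom, if_pos (show x ∈ p ++ [x] by simp), if_neg hp]
        rw [List.filter_cons_of_neg (by simp)]
        have hq : x ∉ pvDedupFrom (p ++ [x]) l :=
          pvDedupFrom_not_mem_seen l (p ++ [x]) x (by simp)
        rw [List.filter_eq_self.mpr (fun a ha => by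
          simp only [ne_eq, decide_eq_true_eq]
          exact fun e => hq (e ▸ ha))]
      · simp only [pvDedupFrom, if_neg (show x ∉ p ++ [q] by simp [hp, hxq]), if_neg hp]
        rw [List.filter_cons_of_pos (by simp [hxq])]
        rw [pvDedupFrom_congr l ((p ++ [q]) ++ [x]) ((p ++ [x]) ++ [q]) (fun y => by simp; tauto)]
        exact congrArg _ (ih (p ++ [x]) q)

-- the B loop consumes the dedup-remainder, n elements at a time
lemma pvPickLoop_main : ∀ (n : Nat) (sigs picked : List String),
    pvPickLoop n sigs picked =
      picked ++ (pvDedupFrom picked (sigs.filterMap pvQOf)).take n := by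
  intro n
  induction n with
  | zero => intros; simp [pvPickLoop]
  | succ n ih =>
    intro sigs picked
    simp only [pvPickLoop, pvFirstNew_eq]
    cases hD : pvDedupFrom picked (sigs.filterMap pvQOf) with
    | nil => simp
    | cons q t =>
      simp only [List.head?_cons, ih, List.take_succ_cons]
      have hnd : (pvDedupFrom picked (sigs.filterMap pvQOf)).Nodup :=
        pvDedupFrom_nodup _ _
      rw [hD] at hnd
      have hqt : q ∉ t := (List.nodup_cons.mp hnd).1
      have ht : pvDedupFrom (picked ++ [q]) (sigs.filterMap pvQOf) = t := by
        rw [pvDedupFrom_snoc, hD, List.filter_cons_of_neg (by simp)]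
        exact List.filter_eq_self.mpr (fun a ha => by
          simp only [ne_eq, decide_eq_true_eq]
          rintro rfl
          exact hqt ha)
      rw [ht]
      simp

theorem build_question_pack_py_spec_aux (signals : List String) :
    build_question_pack_py signals = build_question_pack_py_alt signals := by
  have hA := pvLoopA_main signals [] PySem.Set.empty
    (by intro q; simp [PySem.Set.empty]) (by simp)
  simp only [List.nil_append] at hA
  rw [build_question_pack_py, build_question_pack_py_alt, hA, pvPickLoop_main]
  simp

-- ===== VERDICT (by name: the statement is the Claim_ definition above) =====
theorem build_question_pack_py_spec : Claim_equal_build_question_pack_py := by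
  intro signals _
  exact build_question_pack_py_spec_aux signals
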